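-- pv_equiv track=rewrite | github.com/adisuns/datastructure-algorithms | numberPalinderom.py | Solution
-- ===== SOURCE A (Python) =====
-- def Solution(str_list,size):
--
--     if size ==0:
--         return [[]]
--     temp = []
--     for i in range(0,len(str_list)):
--         num1 = str_list[i]
--         list1 = str_list[i+1:]
--         for num2 in Solution(list1,size-1):
--             number = num1+''.join(num2)
--             temp.append(number)
--
--     return temp
-- ===== SOURCE B (Python) =====
-- def Solution(str_list, size):
--     if size < 0 or size > len(str_list):
--         return []
--     # rows[k] = all k-element index-order combinations of the suffix processed so
--     # far, each concatenated to one string; fold the list right-to-left so that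
--     # combinations starting earlier come first (index-lexicographic order).
--     rows = [['']] + [[] for _ in range(size)]
--     for x in reversed(str_list):
--         rows = [rows[0]] + [[x + c for c in prev] + cur
--                             for prev, cur in zip(rows, rows[1:])]
--     return rows[size]
-- ===== Notes on version B (the rewrite author's own statement) =====
-- stated objective: alternative
-- what changed: Replaces A's branching recursion (which re-solves every suffix via slicing for each start index) with a single right-to-left dynamic-programming pass that keeps one row of partial concatenations per combination length.
-- outside the precondition, e.g. on Solution(['ab', 'c'], 0): A returns [[]], B returns ['']
import Mathlib
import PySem

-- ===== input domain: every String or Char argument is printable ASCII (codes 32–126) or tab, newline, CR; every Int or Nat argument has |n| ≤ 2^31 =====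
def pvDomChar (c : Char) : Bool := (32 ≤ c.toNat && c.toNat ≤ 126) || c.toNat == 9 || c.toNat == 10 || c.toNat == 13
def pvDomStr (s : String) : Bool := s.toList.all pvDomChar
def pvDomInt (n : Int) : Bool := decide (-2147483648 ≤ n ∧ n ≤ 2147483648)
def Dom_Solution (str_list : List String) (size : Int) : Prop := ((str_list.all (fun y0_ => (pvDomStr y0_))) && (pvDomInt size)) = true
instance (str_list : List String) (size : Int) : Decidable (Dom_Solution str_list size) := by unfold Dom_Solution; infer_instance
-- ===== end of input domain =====

-- B replaces A's recompute-per-suffix recursion by one right-to-left dynamic-programming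
-- pass maintaining one row of partial concatenations per combination length.

-- ===== PORT A =====
-- A's loop "for i in range(len(str_list)): num1 = str_list[i]; list1 = str_list[i+1:]; …"
-- is rendered as the structural recursion over the list of suffixes: iteration i handles
-- the head of the i-th suffix.  Python's size==0 base returns [[]]; every recursive use
-- passes its element num2 through ''.join, where ''.join([]) = "" — so the base is [""]
-- here (the top-level size == 0 call, whose value [[]] is not a list of strings, is
-- excluded by Pre_Solution).
def Solution (str_list : List String) (size : Int) : List String :=
  if size = 0 then [""]
  else
    match str_list with
    | [] => []
    | num1 :: rest =>
        ((Solution rest (size - 1)).map (fun num2 => num1 ++ num2)) ++ Solution rest size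

-- ===== PORT B =====
-- rows.getD n [] ports Python's rows[size] (size = n < len rows always); headD [] ports
-- rows[0] (rows is never empty).  The simultaneous zip comprehension of Source B is zipWith.
def Solution_alt (str_list : List String) (size : Int) : List String :=
  if size < 0 ∨ (str_list.length : Int) < size then []
  else
    let n : Nat := size.toNat
    let rows := str_list.foldr
      (fun x rows =>
        rows.headD [] ::
          List.zipWith (fun prev cur => prev.map (fun c => x ++ c) ++ cur) rows rows.tail)
      ([""] :: List.replicate n [])
    rows.getD n []

-- ===== PRECONDITION & SPEC =====
-- Pre_ excludes exactly size == 0, where Python A returns [[]] — a value outside the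
-- declared list-of-strings type (B returns [''] there).
def Pre_Solution (str_list : List String) (size : Int) : Prop := size ≠ 0
instance (str_list : List String) (size : Int) : Decidable (Pre_Solution str_list size) := by unfold Pre_Solution; infer_instance
def pvWitness_Solution : List String × Int := (["ab", "c", "d"], 2)

def Spec_Solution (str_list : List String) (size : Int) (out : List String) : Prop := out = Solution_alt str_list size
instance (str_list : List String) (size : Int) (out : List String) : Decidable (Spec_Solution str_list size out) := by unfold Spec_Solution; infer_instance

-- ===== CLAIM (what is proved, stated in full; the proofs are below) =====
def Claim_equal_Solution : Prop := ∀ (str_list : List String) (size : Int), Dom_Solution str_list size → Pre_Solution str_list size → Spec_Solution str_list size (Solution str_list size)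

-- ===== LEMMAS AND PROOFS =====

-- For negative size A's recursion drains the list and collects nothing.
lemma solution_neg (l : List String) (s : Int) (hs : s < 0) : Solution l s = [] := by
  induction l generalizing s with
  | nil => simp only [Solution]; rw [if_neg (by omega)]
  | cons x rest ih =>
      rw [Solution, if_neg (by omega)]
      simp [ih (s - 1) (by omega), ih s hs]

-- For size larger than the list A's recursion runs out of elements and collects nothing.
lemma solution_big (l : List String) (s : Int) (hs : (l.length : Int) < s) : Solution l s = [] := by
  induction l generalizing s with
  | nil => rw [Solution.eq_def, if_neg (by simp at hs; omega)]
  | cons x rest ih =>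
      simp only [List.length_cons] at hs
      rw [Solution.eq_def, if_neg (by push_cast at hs ⊢; omega)]
      simp [ih (s - 1) (by push_cast at hs ⊢; omega), ih s (by push_cast at hs ⊢; omega)]

-- zipWith of a mapped range with its own tail pairs consecutive values.
lemma zip_consec {α β : Type} (g : α → α → β) :
    ∀ (n : Nat) (f : Nat → α),
      List.zipWith g (f 0 :: (List.range n).map (fun k : Nat => f (k + 1)))
          ((List.range n).map (fun k : Nat => f (k + 1)))
        = (List.range n).map (fun k : Nat => g (f k) (f (k + 1))) := by
  intro n
  induction n with
  | zero => intro f; simp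
  | succ m ih =>
      intro f
      rw [List.range_succ_eq_map]
      simp only [List.map_cons, List.map_map, List.zipWith_cons_cons, Function.comp_def,
        Nat.succ_eq_add_one]
      have h := ih (fun k : Nat => f (k + 1))
      simp only [] at h
      rw [h]

-- A's base and step equations in the form the DP proof uses.
lemma solution_zero (l : List String) : Solution l 0 = [""] := by
  rw [Solution.eq_def]; simp

lemma solution_cons_pos (x : String) (rest : List String) (s : Int) (hs : s ≠ 0) :
    Solution (x :: rest) s
      = (Solution rest (s - 1)).map (fun num2 => x ++ num2) ++ Solution rest s := by
  rw [Solution.eq_def, if_neg hs]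

-- The DP invariant: after folding a suffix l, row k holds exactly A's result on (l, k).
lemma rows_eq (n : Nat) (l : List String) :
    l.foldr
      (fun x rows =>
        rows.headD [] ::
          List.zipWith (fun prev cur => prev.map (fun c => x ++ c) ++ cur) rows rows.tail)
      ([""] :: List.replicate n [])
    = (List.range (n + 1)).map (fun k : Nat => Solution l (k : Int)) := by
  induction l with
  | nil =>
      rw [List.foldr_nil, List.range_succ_eq_map, List.map_cons, List.map_map]
      have h0 : Solution [] (((0 : Nat) : Int)) = [""] := by simp [solution_zero]
      rw [h0]
      congr 1
      refine (List.eq_replicate_iff.mpr ⟨by simp, ?_⟩).symm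
      intro b hb
      simp only [List.mem_map, Function.comp_def] at hb
      obtain ⟨k, _, hk⟩ := hb
      rw [← hk, Solution, if_neg (by omega)]
  | cons x rest ih =>
      rw [List.foldr_cons, ih]
      rw [List.range_succ_eq_map, List.map_cons, List.map_map]
      simp only [Function.comp_def, Nat.succ_eq_add_one, List.headD_cons, List.tail_cons]
      have hz := zip_consec (fun prev cur => prev.map (fun c => x ++ c) ++ cur) n
        (fun k : Nat => Solution rest (k : Int))
      simp only [] at hz
      rw [hz]
      congr 1
      · simp [solution_zero]
      · rw [List.map_map]
        apply List.map_congr_left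
        intro k _
        simp only [Function.comp_def, Nat.succ_eq_add_one]
        rw [solution_cons_pos x rest ((k + 1 : Nat) : Int) (by omega)]
        have h1 : (((k + 1 : Nat) : Int)) - 1 = ((k : Nat) : Int) := by push_cast; ring
        rw [h1]

-- ===== VERDICT (by name: the statement is the Claim_ definition above) =====
theorem Solution_spec : Claim_equal_Solution := by
  intro str_list size _ hpre
  unfold Spec_Solution Solution_alt
  by_cases hc : size < 0 ∨ (str_list.length : Int) < size
  · rw [if_pos hc]
    rcases hc with h | h
    · exact solution_neg _ _ h
    · exact solution_big _ _ h
  · rw [if_neg hc]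
    push Not at hc
    have hpos : 0 < size := lt_of_le_of_ne hc.1 (Ne.symm hpre)
    simp only [rows_eq]
    have hlen : size.toNat < ((List.range (size.toNat + 1)).map
        (fun k : Nat => Solution str_list (k : Int))).length := by simp
    rw [List.getD_eq_getElem _ _ hlen]
    simp only [List.getElem_map, List.getElem_range]
    rw [Int.toNat_of_nonneg (le_of_lt hpos)]
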